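-- pv_equiv track=rewrite | github.com/Amneet47/codewars-amneet47 | 7kyu/apple_boxes.py | apple_boxes
-- ===== SOURCE A (Python) =====
-- def apple_boxes(k):
--     even_sum = 0
--     odd_sum = 0
--     for i in range(1, k+1):
--         if i % 2 == 0:
--             even_sum += i * i
--         else:
--             odd_sum += i * i
--     return (even_sum - odd_sum)
-- ===== SOURCE B (Python) =====
-- def apple_boxes(k):
--     # closed form: sum_{i=1..k} (-1)^i * i^2 = (-1)^k * k*(k+1)/2
--     if k <= 0:
--         return 0
--     t = k * (k + 1) // 2
--     return t if k % 2 == 0 else -t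
-- ===== Notes on version B (the rewrite author's own statement) =====
-- stated objective: faster
-- what changed: replaced the O(k) loop over 1..k with the closed-form identity sum_{i=1..k}(-1)^i i^2 = (-1)^k k(k+1)/2
import Mathlib
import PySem

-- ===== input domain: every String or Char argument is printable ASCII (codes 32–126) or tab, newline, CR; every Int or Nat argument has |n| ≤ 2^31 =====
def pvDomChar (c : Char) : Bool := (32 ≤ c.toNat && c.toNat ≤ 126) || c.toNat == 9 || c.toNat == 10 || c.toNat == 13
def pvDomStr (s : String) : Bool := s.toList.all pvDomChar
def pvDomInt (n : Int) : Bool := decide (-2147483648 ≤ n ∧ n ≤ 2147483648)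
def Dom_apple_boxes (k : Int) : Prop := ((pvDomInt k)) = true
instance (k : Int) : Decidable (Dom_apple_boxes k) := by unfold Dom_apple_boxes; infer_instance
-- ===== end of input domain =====

-- B replaces A's O(k) accumulation loop with the closed form (-1)^k * k*(k+1)/2 (faster, asymptotic).

-- ===== PORT A =====
def appleStep (p : Int × Int) (i : Int) : Int × Int :=
  if PySem.Int.mod i 2 == 0 then (p.1 + i * i, p.2) else (p.1, p.2 + i * i)

def apple_boxes (k : Int) : Int :=
  let r := (PySem.List.pyRange 1 (k + 1) 1).foldl appleStep (0, 0)
  r.1 - r.2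

-- ===== PORT B =====
def apple_boxes_alt (k : Int) : Int :=
  if k ≤ 0 then 0
  else
    let t := PySem.Int.floordiv (k * (k + 1)) 2
    if PySem.Int.mod k 2 == 0 then t else -t

-- ===== PRECONDITION & SPEC =====
def Spec_apple_boxes (k : Int) (out : Int) : Prop := out = apple_boxes_alt k
instance (k : Int) (out : Int) : Decidable (Spec_apple_boxes k out) := by unfold Spec_apple_boxes; infer_instance

-- ===== CLAIM (what is proved, stated in full; the proofs are below) =====
def Claim_equal_apple_boxes : Prop := ∀ (k : Int), Dom_apple_boxes k → Spec_apple_boxes k (apple_boxes k)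

-- ===== LEMMAS AND PROOFS =====

theorem apple_fold_diff (n : Nat) : ∀ es os : Int,
    2 * ((((PySem.List.pyRange 1 ((n : Int) + 1) 1).foldl appleStep (es, os)).1 -
          ((PySem.List.pyRange 1 ((n : Int) + 1) 1).foldl appleStep (es, os)).2)) =
    2 * (es - os) +
      (if n % 2 = 0 then (n : Int) * ((n : Int) + 1) else -((n : Int) * ((n : Int) + 1))) := by
  induction n with
  | zero =>
    intro es os
    simp [PySem.List.pyRange_one_eq_nil (le_refl 1)]
  | succ n ih =>
    intro es os
    have hsplit : PySem.List.pyRange 1 ((↑(n + 1) : Int) + 1) 1 =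
        PySem.List.pyRange 1 ((n : Int) + 1) 1 ++ [(n : Int) + 1] := by
      push_cast
      exact PySem.List.pyRange_one_succ_right (by omega)
    rw [hsplit, List.foldl_append]
    rcases Nat.even_or_odd n with hpar | hpar
    · obtain ⟨q, hq⟩ := hpar
      have hmod : PySem.Int.mod ((n : Int) + 1) 2 = 1 := by
        rw [PySem.Int.mod_eq_emod_of_pos (by omega)]; omega
      simp only [List.foldl_cons, List.foldl_nil, appleStep, hmod]
      have h0 : n % 2 = 0 := by omega
      have h1 : (n + 1) % 2 = 1 := by omega
      simp only [h1]
      norm_num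
      have := ih es os
      simp only [h0, if_true] at this
      nlinarith [this]
    · obtain ⟨q, hq⟩ := hpar
      have hmod : PySem.Int.mod ((n : Int) + 1) 2 = 0 := by
        rw [PySem.Int.mod_eq_emod_of_pos (by omega)]; omega
      simp only [List.foldl_cons, List.foldl_nil, appleStep, hmod]
      have h0 : n % 2 = 1 := by omega
      have h1 : (n + 1) % 2 = 0 := by omega
      simp only [h1]
      norm_num
      have := ih es os
      simp only [h0] at this
      norm_num at this
      nlinarith [this]

-- ===== VERDICT (by name: the statement is the Claim_ definition above) =====
theorem apple_boxes_spec : Claim_equal_apple_boxes := by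
  intro k _
  unfold Spec_apple_boxes apple_boxes apple_boxes_alt
  by_cases hk : k ≤ 0
  · rw [PySem.List.pyRange_one_eq_nil (by omega)]
    simp [hk]
  · have hn : k = ((k.toNat : Nat) : Int) := by omega
    have hd := apple_fold_diff k.toNat 0 0
    rw [← hn] at hd
    have hmodc : PySem.Int.mod k 2 = k % 2 := PySem.Int.mod_eq_emod_of_pos (by omega)
    have hfl : PySem.Int.floordiv (k * (k + 1)) 2 = (k * (k + 1)) / 2 :=
      PySem.Int.floordiv_eq_ediv_of_pos (by omega)
    have hpar : (k.toNat % 2 = 0) ↔ (k % 2 = 0) := by omega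
    simp only [hfl, hmodc, if_neg hk, beq_iff_eq]
    by_cases hp : k % 2 = 0
    · rw [if_pos hp]
      rw [if_pos (hpar.mpr hp)] at hd
      omega
    · rw [if_neg hp]
      rw [if_neg (fun h => hp (hpar.mp h))] at hd
      omega
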